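-- pv_equiv track=rewrite | github.com/jonathantsang/CompetitiveProgramming | binarysearchio/contest6/1.py | solve
-- ===== SOURCE A (Python) =====
-- def solve(nums):
--     # Write your code here
--     i = 0
--     while i < len(nums):
--         if nums[i] % 2 == 0:
--             j = i + 1
--             while j < len(nums):
--                 if nums[j] % 2 == 0:
--                     nums[i], nums[j] = nums[j], nums[i]
--                     break
--                 j += 1
--             i = j
--         i += 1
--     return nums
-- ===== SOURCE B (Python) =====
-- def solve(nums):
--     # Collect the indices of even elements once, then swap them pairwise.
--     idx = [k for k in range(len(nums)) if nums[k] % 2 == 0]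
--     p = 0
--     while p + 1 < len(idx):
--         a, b = idx[p], idx[p + 1]
--         nums[a], nums[b] = nums[b], nums[a]
--         p += 2
--     return nums
-- ===== Notes on version B (the rewrite author's own statement) =====
-- stated objective: simpler
-- what changed: B replaces A's interleaved scan-and-jump (inner while re-scanning forward for the next even) by one pass that collects all even indices into a table, then a second pass that swaps them pairwise.
import Mathlib
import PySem

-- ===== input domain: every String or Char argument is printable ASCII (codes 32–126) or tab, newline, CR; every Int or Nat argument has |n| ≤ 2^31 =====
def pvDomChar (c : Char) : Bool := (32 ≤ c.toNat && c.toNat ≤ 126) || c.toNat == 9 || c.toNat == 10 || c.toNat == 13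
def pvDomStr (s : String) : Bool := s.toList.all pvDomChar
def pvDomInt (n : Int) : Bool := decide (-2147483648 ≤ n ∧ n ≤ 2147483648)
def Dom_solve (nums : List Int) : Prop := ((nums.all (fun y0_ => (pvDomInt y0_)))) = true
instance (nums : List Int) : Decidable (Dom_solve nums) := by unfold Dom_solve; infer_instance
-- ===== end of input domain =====

-- B collects all even indices once and swaps them pairwise, instead of A's interleaved
-- scan with an inner forward re-scan; equal return values, proved below.
-- (Python A and B mutate `nums` in place identically; the theorems are about the return value.)

-- ===== PORT A =====

-- Python simultaneous swap `nums[a], nums[b] = nums[b], nums[a]` (indices in range, distinct):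
-- both right-hand sides read the ORIGINAL list.
def pvSwap (l : List Int) (a b : Nat) : List Int :=
  (l.set a (l.getD b 0)).set b (l.getD a 0)

-- inner `while j < len(nums): if nums[j] % 2 == 0: break; j += 1` — first even index ≥ j, else len
def findNext (nums : List Int) (j : Nat) : Nat :=
  if h : j < nums.length then
    if nums.getD j 0 % 2 = 0 then j else findNext nums (j + 1)
  else j
termination_by nums.length - j

-- outer while loop of A; `i` jumps to j+1 after a swap (i = j; i += 1)
def loopA (nums : List Int) (i : Nat) : List Int :=
  if h : i < nums.length then
    if nums.getD i 0 % 2 = 0 then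
      let j := findNext nums (i + 1)
      if hj : j < nums.length then loopA (pvSwap nums i j) (j + 1) else nums
    else loopA nums (i + 1)
  else nums
termination_by nums.length - i
decreasing_by
  · have hij : i + 1 ≤ findNext nums (i + 1) := by
      clear hj
      generalize i + 1 = j
      fun_induction findNext with
      | case1 => omega
      | case2 _ _ _ _ => omega
      | case3 => omega
    simp only [pvSwap, List.length_set]
    omega
  · omega

def solve (nums : List Int) : List Int := loopA nums 0

-- ===== PORT B =====

-- `while p + 1 < len(idx)`: swap idx[p], idx[p+1], advance p by 2
def pairLoop (nums : List Int) (idx : List Nat) (p : Nat) : List Int :=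
  if h : p + 1 < idx.length then
    pairLoop (pvSwap nums (idx.getD p 0) (idx.getD (p + 1) 0)) idx (p + 2)
  else nums
termination_by idx.length - p

def solve_alt (nums : List Int) : List Int :=
  let idx := (List.range nums.length).filter (fun k => nums.getD k 0 % 2 = 0)
  pairLoop nums idx 0

-- ===== PRECONDITION & SPEC =====
def Spec_solve (nums : List Int) (out : List Int) : Prop := out = solve_alt nums
instance (nums : List Int) (out : List Int) : Decidable (Spec_solve nums out) := by unfold Spec_solve; infer_instance

-- ===== CLAIM (what is proved, stated in full; the proofs are below) =====
def Claim_equal_solve : Prop := ∀ (nums : List Int), Dom_solve nums → Spec_solve nums (solve nums)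

-- ===== LEMMAS AND PROOFS =====

-- proof-side view of B's pointer loop: consume the index list two at a time
def pairConsume (nums : List Int) (idx : List Nat) : List Int :=
  match idx with
  | a :: b :: rest => pairConsume (pvSwap nums a b) rest
  | _ => nums

theorem pairLoop_eq_pairConsume (nums : List Int) (idx : List Nat) (p : Nat) :
    pairLoop nums idx p = pairConsume nums (idx.drop p) := by
  fun_induction pairLoop with
  | case1 nums p h ih =>
      have h1 : p < idx.length := by omega
      rw [List.drop_eq_getElem_cons h1, List.drop_eq_getElem_cons h]
      rw [ih, pairConsume]
      simp [List.getD_eq_getElem?_getD, List.getElem?_eq_getElem h1,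
            List.getElem?_eq_getElem h]
  | case2 nums p h =>
      rcases hD : idx.drop p with _ | ⟨a, t⟩
      · rfl
      · rcases hT : t with _ | ⟨b, t'⟩
        · simp [pairConsume]
        · exfalso
          have := List.length_drop (l := idx) (i := p)
          rw [hD, hT] at this
          simp at this
          omega

-- even indices of l that are ≥ i, in order
def eFrom (l : List Int) (i : Nat) : List Nat :=
  (List.range' i (l.length - i)).filter (fun k => l.getD k 0 % 2 = 0)

theorem eFrom_ge (l : List Int) (i : Nat) (hi : l.length ≤ i) : eFrom l i = [] := by
  simp [eFrom, Nat.sub_eq_zero_of_le hi]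

theorem eFrom_step (l : List Int) (i : Nat) (hi : i < l.length) :
    eFrom l i = (if l.getD i 0 % 2 = 0 then [i] else []) ++ eFrom l (i + 1) := by
  have : l.length - i = (l.length - (i + 1)) + 1 := by omega
  rw [eFrom, this, List.range'_succ, List.filter_cons]
  simp only [eFrom]
  split <;> rename_i h <;> simp only [decide_eq_true_eq, List.getD] at h <;>
    simp [List.getD, h]

theorem le_findNext (l : List Int) (j : Nat) : j ≤ findNext l j := by
  fun_induction findNext with
  | case1 => omega
  | case2 _ _ _ _ => omega
  | case3 => omega

theorem findNext_of_nil (l : List Int) (j : Nat) (hj : j ≤ l.length)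
    (h : eFrom l j = []) : findNext l j = l.length := by
  fun_induction findNext with
  | case1 j hlt hev => rw [eFrom_step l j hlt, hev] at h; simp at h
  | case2 j hlt hev ih =>
      apply ih (by omega)
      rwa [eFrom_step l j hlt, if_neg hev, List.nil_append] at h
  | case3 j hge => omega

theorem findNext_of_cons (l : List Int) (j : Nat) (hj : j ≤ l.length)
    (a : Nat) (rest : List Nat) (h : eFrom l j = a :: rest) :
    findNext l j = a ∧ a < l.length ∧ rest = eFrom l (a + 1) := by
  fun_induction findNext with
  | case1 j hlt hev =>
      rw [eFrom_step l j hlt, if_pos hev] at h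
      simp at h
      obtain ⟨h1, h2⟩ := h
      subst h1
      exact ⟨rfl, hlt, h2.symm⟩
  | case2 j hlt hev ih =>
      rw [eFrom_step l j hlt, if_neg hev, List.nil_append] at h
      exact ih (by omega) h
  | case3 j hge =>
      rw [eFrom_ge l j (by omega)] at h; simp at h

theorem getD_pvSwap_of_gt (l : List Int) (a b k : Nat) (ha : a < k) (hb : b < k) :
    (pvSwap l a b).getD k 0 = l.getD k 0 := by
  simp [pvSwap, List.getD]
  rw [List.getElem?_set_ne (by omega), List.getElem?_set_ne (by omega)]

theorem length_pvSwap (l : List Int) (a b : Nat) : (pvSwap l a b).length = l.length := by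
  simp [pvSwap]

theorem eFrom_pvSwap (l : List Int) (a b i : Nat) (ha : a < i) (hb : b < i) :
    eFrom (pvSwap l a b) i = eFrom l i := by
  unfold eFrom
  rw [length_pvSwap]
  apply List.filter_congr
  intro k hk
  have hki : i ≤ k := (List.mem_range'_1.mp hk).1
  rw [getD_pvSwap_of_gt l a b k (by omega) (by omega)]

theorem loopA_eq_pairLoop (l : List Int) (i : Nat) :
    loopA l i = pairConsume l (eFrom l i) := by
  fun_induction loopA with
  | case1 l i hlt hev j hj ih =>
      -- even at i, next even j exists
      have hji : i + 1 ≤ j := le_findNext l (i + 1)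
      rw [eFrom_step l i hlt, if_pos hev]
      have hcons : ∃ a rest, eFrom l (i + 1) = a :: rest := by
        cases hE : eFrom l (i + 1) with
        | nil => exact absurd (findNext_of_nil l (i + 1) (by omega) hE) (by omega)
        | cons a rest => exact ⟨a, rest, rfl⟩
      obtain ⟨a, rest, hE⟩ := hcons
      obtain ⟨hfa, halt, hrest⟩ := findNext_of_cons l (i + 1) (by omega) a rest hE
      have hja : j = a := hfa
      subst hja
      rw [hE, List.singleton_append, pairConsume, ih,
          eFrom_pvSwap l i j (j + 1) (by omega) (by omega), ← hrest]
  | case2 l i hlt hev j hj =>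
      -- even at i, no further even: j = len
      have hnil : eFrom l (i + 1) = [] := by
        cases hE : eFrom l (i + 1) with
        | nil => rfl
        | cons a rest =>
            have := (findNext_of_cons l (i + 1) (by omega) a rest hE).1
            have := (findNext_of_cons l (i + 1) (by omega) a rest hE).2.1
            omega
      rw [eFrom_step l i hlt, if_pos hev, hnil]
      rfl
  | case3 l i hlt hev ih =>
      rw [eFrom_step l i hlt, if_neg hev, List.nil_append, ih]
  | case4 l i hge =>
      rw [eFrom_ge l i (by omega)]
      rfl

theorem eFrom_zero (l : List Int) :
    eFrom l 0 = (List.range l.length).filter (fun k => l.getD k 0 % 2 = 0) := by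
  simp [eFrom, List.range_eq_range']

-- ===== VERDICT (by name: the statement is the Claim_ definition above) =====
theorem solve_spec : Claim_equal_solve := by
  intro nums _
  unfold Spec_solve solve solve_alt
  rw [loopA_eq_pairLoop, eFrom_zero, pairLoop_eq_pairConsume, List.drop_zero]
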